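-- pv_equiv track=rewrite | github.com/edchengg/gollie-transfusion | GoLLIE/src/tasks/multito/extract_examples.py | summarize_examples
-- ===== SOURCE A (Python) =====
-- from collections import defaultdict, Counter
--
-- def summarize_examples(dataset_words, dataset_labels):
--     entities = defaultdict(Counter)
--     for words, labels in zip(dataset_words, dataset_labels):
--         # Some of the CoNLL02-03 datasets are in IOB1 format instead of IOB2,
--         # we convert them to IOB2, so we don't have to deal with this later.
--         # labels = rewrite_labels(labels=labels, encoding="iob2")
--         # Get labeled word spans
--         spans = []
--         for i, label in enumerate(labels):
--             if label == "NoLabel":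
--                 continue
--             elif label.startswith("B-"):
--
--                 spans.append([label[2:], i, i + 1])
--
--             elif label.startswith("I-"):
--                 try:
--                     spans[-1][2] += 1
--                 except:
--                     pass
--             elif label == "Orecurring_datetime":
--                 continue
--             else:
--                 raise ValueError(f"Found an unexpected label: {label}")
--
--         # Get entities
--         for label, start, end in spans:
--             entities[label][" ".join(words[start:end])] += 1
--     return entities
-- ===== SOURCE B (Python) =====
-- from collections import defaultdict, Counter
--
-- def summarize_examples(dataset_words, dataset_labels):
--     entities = defaultdict(Counter)
--     for words, labels in zip(dataset_words, dataset_labels):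
--         open_span = None  # (label, start, end) of the one currently-open span
--         for i, label in enumerate(labels):
--             if label == "NoLabel" or label == "Orecurring_datetime":
--                 continue
--             if label.startswith("B-"):
--                 if open_span is not None:
--                     l, s, e = open_span
--                     entities[l][" ".join(words[s:e])] += 1
--                 open_span = (label[2:], i, i + 1)
--             elif label.startswith("I-"):
--                 if open_span is not None:
--                     l, s, e = open_span
--                     open_span = (l, s, e + 1)
--             else:
--                 raise ValueError(f"Found an unexpected label: {label}")
--         if open_span is not None:
--             l, s, e = open_span
--             entities[l][" ".join(words[s:e])] += 1
--     return entities
-- ===== Notes on version B (the rewrite author's own statement) =====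
-- stated objective: simpler
-- what changed: Fused A's two per-example passes (build a spans list with last-element mutation, then count the spans) into one streaming loop that carries a single open span and finalizes it on each new B- tag and at end of example.
import Mathlib
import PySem

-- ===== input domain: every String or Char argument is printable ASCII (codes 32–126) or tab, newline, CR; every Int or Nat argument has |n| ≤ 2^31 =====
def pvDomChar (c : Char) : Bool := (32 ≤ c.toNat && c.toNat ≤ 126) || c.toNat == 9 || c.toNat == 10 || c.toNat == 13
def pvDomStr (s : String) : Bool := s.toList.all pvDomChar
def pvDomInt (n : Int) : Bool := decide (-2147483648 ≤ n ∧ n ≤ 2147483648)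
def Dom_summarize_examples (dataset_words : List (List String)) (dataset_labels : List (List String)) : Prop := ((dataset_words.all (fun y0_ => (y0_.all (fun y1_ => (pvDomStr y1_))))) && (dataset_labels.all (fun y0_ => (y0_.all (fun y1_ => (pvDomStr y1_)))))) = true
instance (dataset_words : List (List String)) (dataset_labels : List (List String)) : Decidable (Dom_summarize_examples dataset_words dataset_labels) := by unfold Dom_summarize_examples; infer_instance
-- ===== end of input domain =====

-- B fuses A's two per-example passes (build a spans list, then count it) into one streaming
-- pass holding a single open span; same return value, different decomposition (not claimed faster).

-- ===== PORT A =====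
-- shared with port B (both Pythons contain the literal line `entities[label][" ".join(words[start:end])] += 1`)
def pvBump (words : List String) (e : PySem.Dict String (PySem.Dict String Int))
    (sp : String × Int × Int) : PySem.Dict String (PySem.Dict String Int) :=
  e.modify sp.1 PySem.Dict.empty
    (fun c => c.modify (PySem.Str.join " " (PySem.List.slice words (some sp.2.1) (some sp.2.2))) 0 (· + 1))

-- spans[-1][2] += 1 on a list built by appending: increment the end of the last span (no-op on [])
def pvIncLast : List (String × Int × Int) → List (String × Int × Int)
  | [] => []
  | [(l, s, e)] => [(l, s, e + 1)]
  | x :: y :: rest => x :: pvIncLast (y :: rest)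

-- A's first per-example loop: `for i, label in enumerate(labels)` building `spans`
def pvBuildSpans : List (Int × String) → List (String × Int × Int) → List (String × Int × Int)
  | [], sp => sp
  | (i, lab) :: rest, sp =>
    if lab = "NoLabel" then pvBuildSpans rest sp
    else if PySem.Str.startswith lab "B-" then
      pvBuildSpans rest (sp ++ [(String.mk (PySem.Chars.slice lab.toList (some 2) none), i, i + 1)])
    else if PySem.Str.startswith lab "I-" then pvBuildSpans rest (pvIncLast sp)
    else if lab = "Orecurring_datetime" then pvBuildSpans rest sp
    else pvBuildSpans rest sp  -- Python raises ValueError here; excluded by Pre_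

def summarize_examples (dataset_words : List (List String)) (dataset_labels : List (List String)) : List (String × List (String × Int)) :=
  let entities := (List.zip dataset_words dataset_labels).foldl
    (fun ents p =>
      let spans := pvBuildSpans (PySem.List.enumerate p.2 0) []
      spans.foldl (pvBump p.1) ents)
    PySem.Dict.empty
  entities.items.map (fun q => (q.1, q.2.items))

-- ===== PORT B =====
-- finalize the currently open span, if any
def pvFinalize (words : List String) (e : PySem.Dict String (PySem.Dict String Int)) :
    Option (String × Int × Int) → PySem.Dict String (PySem.Dict String Int)
  | none => e
  | some sp => pvBump words e sp

-- one step of B's single streaming loop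
def pvStep (words : List String)
    (st : PySem.Dict String (PySem.Dict String Int) × Option (String × Int × Int))
    (il : Int × String) :
    PySem.Dict String (PySem.Dict String Int) × Option (String × Int × Int) :=
  if il.2 = "NoLabel" ∨ il.2 = "Orecurring_datetime" then st
  else if PySem.Str.startswith il.2 "B-" then
    (pvFinalize words st.1 st.2,
     some (String.mk (PySem.Chars.slice il.2.toList (some 2) none), il.1, il.1 + 1))
  else if PySem.Str.startswith il.2 "I-" then
    (st.1, st.2.map (fun sp => (sp.1, sp.2.1, sp.2.2 + 1)))
  else st  -- Python raises ValueError here; excluded by Pre_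

def summarize_examples_alt (dataset_words : List (List String)) (dataset_labels : List (List String)) : List (String × List (String × Int)) :=
  let entities := (List.zip dataset_words dataset_labels).foldl
    (fun ents p =>
      let st := (PySem.List.enumerate p.2 0).foldl (pvStep p.1) (ents, none)
      pvFinalize p.1 st.1 st.2)
    PySem.Dict.empty
  entities.items.map (fun q => (q.1, q.2.items))

-- ===== PRECONDITION & SPEC =====
-- Pre_ excludes exactly the inputs on which Python A raises ValueError: an unexpected label
-- inside some example reached by zip.
def Pre_summarize_examples (dataset_words : List (List String)) (dataset_labels : List (List String)) : Prop :=
  ∀ p ∈ List.zip dataset_words dataset_labels, ∀ lab ∈ p.2,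
    lab = "NoLabel" ∨ lab = "Orecurring_datetime" ∨
    PySem.Str.startswith lab "B-" = true ∨ PySem.Str.startswith lab "I-" = true
instance (dataset_words : List (List String)) (dataset_labels : List (List String)) : Decidable (Pre_summarize_examples dataset_words dataset_labels) := by unfold Pre_summarize_examples; infer_instance

def pvWitness_summarize_examples : List (List String) × List (List String) :=
  ([["John", "Smith", "lives"]], [["B-PER", "I-PER", "NoLabel"]])

def Spec_summarize_examples (dataset_words : List (List String)) (dataset_labels : List (List String)) (out : List (String × List (String × Int))) : Prop := out = summarize_examples_alt dataset_words dataset_labels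
instance (dataset_words : List (List String)) (dataset_labels : List (List String)) (out : List (String × List (String × Int))) : Decidable (Spec_summarize_examples dataset_words dataset_labels out) := by unfold Spec_summarize_examples; infer_instance

-- ===== CLAIM (what is proved, stated in full; the proofs are below) =====
def Claim_equal_summarize_examples : Prop := ∀ (dataset_words : List (List String)) (dataset_labels : List (List String)), Dom_summarize_examples dataset_words dataset_labels → Pre_summarize_examples dataset_words dataset_labels → Spec_summarize_examples dataset_words dataset_labels (summarize_examples dataset_words dataset_labels)

-- ===== LEMMAS AND PROOFS =====

theorem pvIncLast_ne_nil (sp : List (String × Int × Int)) (h : sp ≠ []) : pvIncLast sp ≠ [] := by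
  match sp with
  | [(l, s, e)] => simp [pvIncLast]
  | x :: y :: rest => simp [pvIncLast]

theorem pvIncLast_append (pre sp : List (String × Int × Int)) (h : sp ≠ []) :
    pvIncLast (pre ++ sp) = pre ++ pvIncLast sp := by
  induction pre with
  | nil => rfl
  | cons x pre ih =>
    match hps : pre ++ sp with
    | [] => exact absurd (List.append_eq_nil_iff.mp hps).2 h
    | y :: rest =>
      simp only [List.cons_append, hps, pvIncLast]
      rw [← hps, ih]

theorem pvBuildSpans_append (ps : List (Int × String)) :
    ∀ (pre sp : List (String × Int × Int)), sp ≠ [] →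
    pvBuildSpans ps (pre ++ sp) = pre ++ pvBuildSpans ps sp := by
  induction ps with
  | nil => intro pre sp h; rfl
  | cons il rest ih =>
    intro pre sp h
    obtain ⟨i, lab⟩ := il
    simp only [pvBuildSpans]
    split_ifs with h1 h2 h3 h4
    · exact ih pre sp h
    · rw [List.append_assoc]
      exact ih pre (sp ++ [_]) (by simp)
    · rw [pvIncLast_append pre sp h]
      exact ih pre (pvIncLast sp) (pvIncLast_ne_nil sp h)
    · exact ih pre sp h
    · exact ih pre sp h

-- turn an open span into the spans list it stands for
def pvOptList : Option (String × Int × Int) → List (String × Int × Int)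
  | none => []
  | some sp => [sp]

theorem pvFinalize_eq_foldl (words : List String) (e : PySem.Dict String (PySem.Dict String Int))
    (o : Option (String × Int × Int)) :
    pvFinalize words e o = (pvOptList o).foldl (pvBump words) e := by
  cases o <;> rfl

-- main per-example invariant: B's streaming fold, then finalize, equals counting A's spans list
theorem pvStream_eq (words : List String) (ps : List (Int × String)) :
    ∀ (e : PySem.Dict String (PySem.Dict String Int)) (o : Option (String × Int × Int)),
    pvFinalize words (ps.foldl (pvStep words) (e, o)).1 (ps.foldl (pvStep words) (e, o)).2
      = (pvBuildSpans ps (pvOptList o)).foldl (pvBump words) e := by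
  induction ps with
  | nil => intro e o; simp [pvBuildSpans, pvFinalize_eq_foldl]
  | cons il rest ih =>
    intro e o
    obtain ⟨i, lab⟩ := il
    simp only [List.foldl_cons, pvStep, pvBuildSpans]
    by_cases h1 : lab = "NoLabel"
    · subst h1; simp only [if_pos (Or.inl rfl)]; exact ih e o
    by_cases h2 : lab = "Orecurring_datetime"
    · subst h2
      simp only [if_pos (Or.inr (rfl : "Orecurring_datetime" = "Orecurring_datetime")), if_neg (by decide : ¬ ("Orecurring_datetime" = "NoLabel")),
        if_neg (by decide : ¬ PySem.Str.startswith "Orecurring_datetime" "B-" = true),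
        if_neg (by decide : ¬ PySem.Str.startswith "Orecurring_datetime" "I-" = true)]
      exact ih e o
    have hno : ¬ (lab = "NoLabel" ∨ lab = "Orecurring_datetime") := by tauto
    by_cases h3 : PySem.Str.startswith lab "B-" = true
    · simp only [if_neg hno, if_neg h1, if_pos h3]
      rw [ih]
      have hsp : pvOptList o ++ [(String.mk (PySem.Chars.slice lab.toList (some 2) none), i, i + 1)]
          = pvOptList o ++ pvOptList (some (String.mk (PySem.Chars.slice lab.toList (some 2) none), i, i + 1)) := rfl
      rw [hsp, pvBuildSpans_append rest _ _ (by simp [pvOptList]), List.foldl_append,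
        ← pvFinalize_eq_foldl]
    by_cases h4 : PySem.Str.startswith lab "I-" = true
    · simp only [if_neg hno, if_neg h1, if_neg h3, if_pos h4, if_neg h2]
      have : pvIncLast (pvOptList o) = pvOptList (o.map (fun sp => (sp.1, sp.2.1, sp.2.2 + 1))) := by
        cases o with
        | none => rfl
        | some sp => obtain ⟨l, s, en⟩ := sp; rfl
      rw [this]; exact ih e _
    · simp only [if_neg hno, if_neg h1, if_neg h3, if_neg h4, if_neg h2]
      exact ih e o

theorem pvPerExample_eq (p : List String × List String)
    (ents : PySem.Dict String (PySem.Dict String Int)) :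
    (let st := (PySem.List.enumerate p.2 0).foldl (pvStep p.1) (ents, none)
     pvFinalize p.1 st.1 st.2)
      = (pvBuildSpans (PySem.List.enumerate p.2 0) []).foldl (pvBump p.1) ents := by
  exact pvStream_eq p.1 (PySem.List.enumerate p.2 0) ents none

-- ===== VERDICT (by name: the statement is the Claim_ definition above) =====
theorem summarize_examples_spec : Claim_equal_summarize_examples := by
  intro dw dl _ _
  unfold Spec_summarize_examples summarize_examples summarize_examples_alt
  have : (fun (ents : PySem.Dict String (PySem.Dict String Int)) (p : List String × List String) =>
        (pvBuildSpans (PySem.List.enumerate p.2 0) []).foldl (pvBump p.1) ents)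
      = (fun ents p =>
        let st := (PySem.List.enumerate p.2 0).foldl (pvStep p.1) (ents, none)
        pvFinalize p.1 st.1 st.2) := by
    funext ents p
    exact (pvPerExample_eq p ents).symm
  simp only [this]
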